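-- pv_equiv track=rewrite | github.com/thaReal/MasterChef | codeforces/round_644/pairs.py | solve
-- ===== SOURCE A (Python) =====
-- def solve(n, a):
-- 	a.sort()
--
-- 	evens = 0
-- 	odds = 0
-- 	one_off = 0
--
-- 	for i in range(n):
-- 		val = a[i]
-- 		if val % 2:
-- 			odds += 1
-- 		else:
-- 			evens += 1
--
-- 		if i != 0:
-- 			if a[i] - a[i-1] == 1:
-- 				one_off += 1
--
-- 	cnt = 0
-- 	cnt += evens % 2
-- 	cnt += odds % 2
-- 	if cnt == 0:
-- 		return "YES"
--
-- 	while one_off > 0: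
-- 		odds -= 1
-- 		evens -= 1
--
-- 		cnt = 0
-- 		cnt += evens % 2
-- 		cnt += odds % 2
-- 		if cnt == 0:
-- 			return "YES"
--
-- 		one_off -= 1
--
-- 	return "NO"
-- ===== SOURCE B (Python) =====
-- def solve(n, a):
--     a.sort()
--     p = a[:max(n, 0)]          # the first n elements (none when n <= 0, as for range(n))
--     if len(p) % 2:
--         return "NO"
--     odds = sum(x % 2 for x in p)
--     if odds % 2 == 0:
--         return "YES"
--     s = set(p)
--     return "YES" if any(x + 1 in s for x in p) else "NO"
-- ===== Notes on version B (the rewrite author's own statement) =====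
-- stated objective: alternative
-- what changed: A's index-scan counters plus a decrementing while-loop are replaced by a closed parity argument on the sorted prefix (NO for an odd prefix, YES when the odd count is even, otherwise YES iff some x and x+1 both occur, detected with a hash set) with no while loop and no adjacent-difference counting.
import Mathlib
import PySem

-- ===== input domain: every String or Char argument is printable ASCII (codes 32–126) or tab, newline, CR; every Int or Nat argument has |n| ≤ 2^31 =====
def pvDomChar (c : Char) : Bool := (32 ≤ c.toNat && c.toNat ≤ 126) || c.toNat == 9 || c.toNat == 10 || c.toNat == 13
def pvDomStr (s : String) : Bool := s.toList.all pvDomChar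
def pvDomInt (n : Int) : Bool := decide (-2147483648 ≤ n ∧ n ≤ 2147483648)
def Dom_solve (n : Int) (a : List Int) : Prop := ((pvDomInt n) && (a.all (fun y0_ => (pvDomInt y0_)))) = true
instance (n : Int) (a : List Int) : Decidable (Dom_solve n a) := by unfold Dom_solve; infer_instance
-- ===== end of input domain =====

-- B replaces A's sort-scan counters and decrement loop by a closed parity test plus a
-- set-membership check for a pair differing by 1 (objective: alternative algorithm, same overall cost).
-- NOTE: both A and B sort the list argument in place in Python; the equivalence proved here is about the return value.

-- ===== PORT A =====
def solveWhile (evens odds one_off : Int) : String :=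
  if h : one_off > 0 then
    let odds' := odds - 1
    let evens' := evens - 1
    if PySem.Int.mod evens' 2 + PySem.Int.mod odds' 2 = 0 then "YES"
    else solveWhile evens' odds' (one_off - 1)
  else "NO"
termination_by one_off.toNat
decreasing_by omega

def loopA (s : List Int) (st : Int × Int × Int) (i : Int) : Int × Int × Int :=
  let val := PySem.List.pyGetD s i 0
  let eo : Int × Int :=
    if PySem.Int.mod val 2 ≠ 0 then (st.1, st.2.1 + 1) else (st.1 + 1, st.2.1)
  let one_off : Int :=
    if i ≠ 0 then
      (if PySem.List.pyGetD s i 0 - PySem.List.pyGetD s (i - 1) 0 = 1 then st.2.2 + 1 else st.2.2)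
    else st.2.2
  (eo.1, eo.2, one_off)

def solve (n : Int) (a : List Int) : String :=
  let s := PySem.List.sorted a (fun x => x) false
  let st := (PySem.List.pyRange 0 n 1).foldl (loopA s) (0, 0, 0)
  if PySem.Int.mod st.1 2 + PySem.Int.mod st.2.1 2 = 0 then "YES"
  else solveWhile st.1 st.2.1 st.2.2

-- ===== PORT B =====
def solve_alt (n : Int) (a : List Int) : String :=
  let s0 := PySem.List.sorted a (fun x => x) false
  let p := PySem.List.slice s0 none (some (max n 0))
  if PySem.Int.mod (p.length : Int) 2 ≠ 0 then "NO"
  else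
    let odds := (p.map (fun x => PySem.Int.mod x 2)).sum
    if PySem.Int.mod odds 2 = 0 then "YES"
    else
      let s := PySem.Set.ofList p
      if p.any (fun x => PySem.Set.contains s (x + 1)) then "YES" else "NO"

-- ===== PRECONDITION & SPEC =====
-- Pre_ excludes exactly the inputs n > len(a), on which A raises IndexError.
def Pre_solve (n : Int) (a : List Int) : Prop := n ≤ a.length
instance (n : Int) (a : List Int) : Decidable (Pre_solve n a) := by unfold Pre_solve; infer_instance
def pvWitness_solve : Int × List Int := (2, [1, 2])
def Spec_solve (n : Int) (a : List Int) (out : String) : Prop := out = solve_alt n a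
instance (n : Int) (a : List Int) (out : String) : Decidable (Spec_solve n a out) := by unfold Spec_solve; infer_instance

-- ===== CLAIM (what is proved, stated in full; the proofs are below) =====
def Claim_equal_solve : Prop := ∀ (n : Int) (a : List Int), Dom_solve n a → Pre_solve n a → Spec_solve n a (solve n a)

-- ===== LEMMAS AND PROOFS =====

-- counters over the processed prefix
def cntEven (l : List Int) : Int := (l.countP (fun x => decide (x % 2 = 0)) : Int)
def cntOdd (l : List Int) : Int := (l.countP (fun x => decide (x % 2 = 1)) : Int)
def adjCnt : List Int → Int
  | x :: y :: t => (if y - x = 1 then 1 else 0) + adjCnt (y :: t)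
  | _ => 0

theorem mod2_eq_emod (a : Int) : PySem.Int.mod a 2 = a % 2 :=
  PySem.Int.mod_eq_emod_of_pos (by norm_num)

theorem adjCnt_nonneg : ∀ l : List Int, 0 ≤ adjCnt l
  | [] => by simp [adjCnt]
  | [_] => by simp [adjCnt]
  | x :: y :: t => by
      have h := adjCnt_nonneg (y :: t)
      simp only [adjCnt]
      split <;> omega

theorem adjCnt_append_singleton : ∀ (xs : List Int) (y : Int),
    adjCnt (xs ++ [y]) = adjCnt xs + (if xs = [] then 0 else if y - xs.getLastD 0 = 1 then 1 else 0)
  | [], y => by simp [adjCnt]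
  | [x], y => by simp [adjCnt]
  | x :: z :: t, y => by
      have ih := adjCnt_append_singleton (z :: t) y
      simp only [List.cons_append, adjCnt] at *
      simp only [List.getLastD_cons] at *
      rw [ih]
      simp
      omega

theorem adjCnt_pos_of_pair : ∀ (l : List Int), l.Pairwise (· ≤ ·) → ∀ x : Int,
    x ∈ l → x + 1 ∈ l → 0 < adjCnt l
  | [], _, x, hx, _ => by simp at hx
  | [u], _, x, hx, hx1 => by
      simp at hx hx1; omega
  | u :: v :: t, hp, x, hx, hx1 => by
      have hub : ∀ y ∈ v :: t, u ≤ y := fun y hy => List.rel_of_pairwise_cons hp hy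
      have hp' : (v :: t).Pairwise (· ≤ ·) := hp.of_cons
      have hnn := adjCnt_nonneg (v :: t)
      by_cases hd : v - u = 1
      · simp only [adjCnt]; simp [hd]; omega
      · simp only [adjCnt]; simp only [hd, if_false]
        have key : x ∈ v :: t ∧ x + 1 ∈ v :: t := by
          rcases List.mem_cons.mp hx with hxu | hxt
          · rcases List.mem_cons.mp hx1 with hx1u | hx1t
            · omega
            · -- x = u, x+1 in tail; v ≤ x+1 and u ≤ v forces v = u = x
              have hv1 : v ≤ x + 1 := by
                rcases List.mem_cons.mp hx1t with h1 | h1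
                · omega
                · exact List.rel_of_pairwise_cons hp' h1
              have huv : u ≤ v := hub v (by simp)
              have : v = x := by omega
              exact ⟨by simp [← this], hx1t⟩
          · rcases List.mem_cons.mp hx1 with hx1u | hx1t
            · have := hub x hxt; omega
            · exact ⟨hxt, hx1t⟩
        have := adjCnt_pos_of_pair (v :: t) hp' x key.1 key.2
        omega

theorem pair_of_adjCnt_pos : ∀ l : List Int, 0 < adjCnt l → ∃ x ∈ l, x + 1 ∈ l
  | [], h => by simp [adjCnt] at h
  | [_], h => by simp [adjCnt] at h
  | x :: y :: t, h => by
      by_cases hd : y - x = 1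
      · exact ⟨x, by simp, by rw [show x + 1 = y by omega]; simp⟩
      · have h' : 0 < adjCnt (y :: t) := by simp only [adjCnt] at h; simp [hd] at h; exact h
        obtain ⟨z, hz, hz1⟩ := pair_of_adjCnt_pos (y :: t) h'
        exact ⟨z, List.mem_cons_of_mem _ hz, List.mem_cons_of_mem _ hz1⟩

theorem take_succ_elem (s : List Int) (j : Nat) (h : j < s.length) :
    s.take (j + 1) = s.take j ++ [s[j]] := by
  rw [List.take_add_one, List.getElem?_eq_getElem h]
  rfl

theorem cntEven_append_singleton (l : List Int) (x : Int) :
    cntEven (l ++ [x]) = cntEven l + (if x % 2 = 0 then 1 else 0) := by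
  simp [cntEven, List.countP_append, List.countP_cons]

theorem cntOdd_append_singleton (l : List Int) (x : Int) :
    cntOdd (l ++ [x]) = cntOdd l + (if x % 2 = 1 then 1 else 0) := by
  simp [cntOdd, List.countP_append, List.countP_cons]

theorem foldA_take (s : List Int) (m : Nat) (hm : m ≤ s.length) :
    (PySem.List.pyRange 0 (m : Int) 1).foldl (loopA s) (0, 0, 0)
      = (cntEven (s.take m), cntOdd (s.take m), adjCnt (s.take m)) := by
  induction m with
  | zero => simp [PySem.List.pyRange_one_eq_nil, cntEven, cntOdd, adjCnt]
  | succ m ih =>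
      have hlt : m < s.length := hm
      have hm' : m ≤ s.length := Nat.le_of_succ_le hm
      have hcast : ((m + 1 : Nat) : Int) = (m : Int) + 1 := by push_cast; ring
      rw [hcast, PySem.List.pyRange_one_succ_right (Int.natCast_nonneg m), List.foldl_append, ih hm']
      rw [take_succ_elem s m hlt]
      simp only [List.foldl_cons, List.foldl_nil]
      rw [cntEven_append_singleton, cntOdd_append_singleton, adjCnt_append_singleton]
      rcases Nat.eq_zero_or_pos m with hm0 | hmpos
      · subst hm0
        simp only [loopA, Nat.cast_zero, PySem.List.pyGetD_zero]
        rw [List.getD_eq_getElem _ _ hlt]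
        rw [if_neg (show ¬ ((0 : Int) ≠ 0) by simp)]
        simp only [mod2_eq_emod]
        by_cases hpar : s[0] % 2 = 0 <;>
          simp [hpar, cntEven, cntOdd, adjCnt, Prod.mk.injEq]
      · obtain ⟨k, rfl⟩ := Nat.exists_eq_succ_of_ne_zero (Nat.pos_iff_ne_zero.mp hmpos)
        have hk : k < s.length := by omega
        have hlast : (s.take (k + 1)).getLast?.getD 0 = s[k] := by
          rw [take_succ_elem s k hk, List.getLast?_concat]
          rfl
        have hlen : (s.take (k + 1)).length = k + 1 := by
          simp [List.length_take]
          omega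
        have hne : ¬ (s.take (k + 1) = []) := by
          intro h
          rw [h] at hlen
          simp at hlen
        have hidx : ((k + 1 : Nat) : Int) - 1 = ((k : Nat) : Int) := by push_cast; ring
        simp only [loopA, hidx, PySem.List.pyGetD_natCast]
        rw [List.getD_eq_getElem _ _ hlt, List.getD_eq_getElem _ _ hk]
        rw [if_pos (show ((k + 1 : Nat) : Int) ≠ 0 by push_cast; omega)]
        simp only [mod2_eq_emod]
        by_cases hpar : s[k + 1] % 2 = 0 <;>
          by_cases hdif : s[k + 1] - s[k] = 1 <;>
            simp [hpar, hdif, hne, hlast, Prod.mk.injEq]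

theorem solveWhile_no (k : Nat) (E O C : Int) (hC : C.toNat = k)
    (h : E % 2 + O % 2 = 1) : solveWhile E O C = "NO" := by
  induction k generalizing E O C with
  | zero =>
      rw [solveWhile]
      have : ¬ C > 0 := by omega
      simp [this]
  | succ k ih =>
      rw [solveWhile]
      by_cases hc : C > 0
      · simp only [hc, dif_pos]
        have h1 : ¬ (PySem.Int.mod (E - 1) 2 + PySem.Int.mod (O - 1) 2 = 0) := by
          simp only [mod2_eq_emod]; omega
        simp only [h1, if_false]
        exact ih (E - 1) (O - 1) (C - 1) (by omega) (by omega)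
      · simp [hc]

theorem solveWhile_yes (E O C : Int) (hC : 0 < C) (hE : E % 2 = 1) (hO : O % 2 = 1) :
    solveWhile E O C = "YES" := by
  rw [solveWhile]
  simp only [mod2_eq_emod]
  have h1 : (E - 1) % 2 + (O - 1) % 2 = 0 := by omega
  simp [hC, h1]

theorem sum_mods (l : List Int) : (l.map (fun x => PySem.Int.mod x 2)).sum = cntOdd l := by
  induction l with
  | nil => simp [cntOdd]
  | cons x t ih =>
      simp only [List.map_cons, List.sum_cons, mod2_eq_emod, cntOdd, List.countP_cons] at *
      by_cases h : x % 2 = 1 <;> simp [h] <;> omega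

theorem cnt_sum (l : List Int) : cntEven l + cntOdd l = (l.length : Int) := by
  induction l with
  | nil => simp [cntEven, cntOdd]
  | cons x t ih =>
      have hx : x % 2 = 0 ∨ x % 2 = 1 := by omega
      simp only [cntEven, cntOdd, List.countP_cons, List.length_cons] at *
      rcases hx with h | h
      · have d1 : decide (x % 2 = 0) = true := by simp [h]
        have d2 : decide (x % 2 = 1) = false := by rw [h]; decide
        rw [d1, d2]
        push_cast
        simp only [if_true]
        omega
      · have d1 : decide (x % 2 = 0) = false := by rw [h]; decide
        have d2 : decide (x % 2 = 1) = true := by rw [h]; decide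
        rw [d1, d2]
        push_cast
        simp only [if_true]
        omega

-- ===== VERDICT (by name: the statement is the Claim_ definition above) =====
theorem solve_spec : Claim_equal_solve := by
  intro n a hdom hpre
  have hnle : n ≤ (a.length : Int) := hpre
  unfold Spec_solve
  simp only [solve, solve_alt]
  set s := PySem.List.sorted a (fun x => x) false with hs
  have hslen : s.length = a.length := PySem.List.length_sorted a (fun x => x) false
  rcases Int.lt_or_le n 0 with hneg | hn0
  · -- n < 0: A's range is empty, B's prefix is empty; both return "YES"
    rw [PySem.List.pyRange_one_eq_nil (by omega)]
    rw [show max n 0 = (0 : Int) by omega]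
    rw [PySem.List.slice_to s (by omega)]
    simp [PySem.Int.mod]
  have hnle' : n.toNat ≤ s.length := by omega
  have hncast : ((n.toNat : Nat) : Int) = n := Int.toNat_of_nonneg hn0
  have hmax : max n 0 = n := by omega
  rw [hmax]
  have hslice : PySem.List.slice s none (some n) = s.take n.toNat := PySem.List.slice_to s hn0
  set p := s.take n.toNat with hpdef
  have hfold : (PySem.List.pyRange 0 n 1).foldl (loopA s) (0, 0, 0)
      = (cntEven p, cntOdd p, adjCnt p) := by
    rw [← hncast]
    exact foldA_take s n.toNat hnle'
  have hplen : (p.length : Int) = n := by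
    rw [hpdef]
    simp [List.length_take]
    omega
  have hEO : cntEven p + cntOdd p = n := by rw [cnt_sum]; exact hplen
  have hpair : p.Pairwise (· ≤ ·) := by
    have h1 : s.Pairwise (· ≤ ·) := by
      have h2 := PySem.List.sorted_pairwise a (fun x => x)
      simpa using h2
    exact h1.sublist (List.take_sublist _ _)
  have hany : (p.any (fun x => PySem.Set.contains (PySem.Set.ofList p) (x + 1)) = true)
      ↔ ∃ x ∈ p, x + 1 ∈ p := by
    simp [List.any_eq_true, PySem.Set.mem_ofList]
  rw [hfold, hslice, sum_mods]
  simp only [mod2_eq_emod]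
  rw [show ((p.length : Int)) = n from hplen]
  by_cases hodd : n % 2 = 1
  · have h1 : cntEven p % 2 + cntOdd p % 2 = 1 := by omega
    have hA : ¬ (cntEven p % 2 + cntOdd p % 2 = 0) := by omega
    have hB : n % 2 ≠ 0 := by omega
    rw [if_neg hA, if_pos hB]
    exact solveWhile_no (adjCnt p).toNat _ _ _ rfl h1
  · have hn2 : n % 2 = 0 := by omega
    have hB : ¬ (n % 2 ≠ 0) := by omega
    rw [if_neg hB]
    by_cases ho : cntOdd p % 2 = 0
    · have hA : cntEven p % 2 + cntOdd p % 2 = 0 := by omega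
      rw [if_pos hA, if_pos ho]
    · have ho1 : cntOdd p % 2 = 1 := by omega
      have he1 : cntEven p % 2 = 1 := by omega
      have hA : ¬ (cntEven p % 2 + cntOdd p % 2 = 0) := by omega
      rw [if_neg hA, if_neg ho]
      by_cases hC : 0 < adjCnt p
      · obtain ⟨x, hx, hx1⟩ := pair_of_adjCnt_pos p hC
        rw [if_pos (hany.mpr ⟨x, hx, hx1⟩)]
        exact solveWhile_yes _ _ _ hC he1 ho1
      · have hnopair : ¬ (p.any (fun x => PySem.Set.contains (PySem.Set.ofList p) (x + 1)) = true) := by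
          intro h
          obtain ⟨x, hx, hx1⟩ := hany.mp h
          exact hC (adjCnt_pos_of_pair p hpair x hx hx1)
        rw [if_neg hnopair, solveWhile]
        simp [show ¬ adjCnt p > 0 by omega]
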